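-- pv_equiv track=rewrite | github.com/cppietime/Mutasic | chords.py | mode_of_scale
-- ===== SOURCE A (Python) =====
-- def mode_of_scale(scale, mode):
--     if mode < 0 or mode >= len(scale):
--         raise ValueError(f'{mode} not within range of provided scale')
--     if mode == 0:
--         return scale
--     intervals = [scale[i] - scale[i - 1] for i in range(1, len(scale))]
--     intervals.append(12 - sum(intervals))
--     intervals = intervals[mode:] + intervals[:mode]
--     scale = [0]
--     for i in intervals[:-1]:
--         scale.append(scale[-1] + i)
--     return scale
-- ===== SOURCE B (Python) =====
-- def mode_of_scale(scale, mode):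
--     n = len(scale)
--     if mode < 0 or mode >= n:
--         raise ValueError(f'{mode} not within range of provided scale')
--     if mode == 0:
--         return scale
--     root = scale[mode]
--     return [scale[(mode + k) % n] - root + (12 if mode + k >= n else 0)
--             for k in range(n)]
-- ===== Notes on version B (the rewrite author's own statement) =====
-- stated objective: simpler
-- what changed: Replaces the interval-difference list, its rotation and the accumulating append loop by a single comprehension computing each note directly from the rotated index: scale[(mode+k)%n] - scale[mode] + 12 on wrap.
import Mathlib
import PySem

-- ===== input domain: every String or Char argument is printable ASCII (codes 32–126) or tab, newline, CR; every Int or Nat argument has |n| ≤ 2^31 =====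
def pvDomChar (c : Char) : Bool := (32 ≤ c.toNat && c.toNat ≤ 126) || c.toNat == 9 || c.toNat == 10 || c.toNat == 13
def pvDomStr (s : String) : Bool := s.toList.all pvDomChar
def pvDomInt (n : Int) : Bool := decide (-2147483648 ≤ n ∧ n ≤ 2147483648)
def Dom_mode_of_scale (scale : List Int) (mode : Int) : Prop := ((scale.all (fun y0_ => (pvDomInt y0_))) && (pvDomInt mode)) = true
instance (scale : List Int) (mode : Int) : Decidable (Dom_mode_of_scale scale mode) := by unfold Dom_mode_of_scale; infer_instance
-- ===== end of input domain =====

-- B replaces the interval list, its rotation and the accumulation loop by one comprehension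
-- reading each note directly from the rotated index (objective: simpler).

-- ===== PORT A =====
def mode_of_scale (scale : List Int) (mode : Int) : List Int :=
  if mode < 0 ∨ mode ≥ (scale.length : Int) then []  -- Python raises ValueError here; excluded by Pre_
  else if mode = 0 then scale
  else
    let intervals0 := (PySem.List.pyRange 1 scale.length 1).map
      (fun i => PySem.List.pyGetD scale i 0 - PySem.List.pyGetD scale (i - 1) 0)
    let intervals1 := intervals0 ++ [12 - intervals0.sum]
    let intervals2 := PySem.List.slice intervals1 (some mode) none ++
      PySem.List.slice intervals1 none (some mode)
    (PySem.List.slice intervals2 none (some (-1))).foldl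
      (fun acc i => acc ++ [PySem.List.pyGetD acc (-1) 0 + i]) [0]

-- ===== PORT B =====
def mode_of_scale_alt (scale : List Int) (mode : Int) : List Int :=
  if mode < 0 ∨ mode ≥ (scale.length : Int) then []  -- Python raises ValueError here; excluded by Pre_
  else if mode = 0 then scale
  else
    let root := PySem.List.pyGetD scale mode 0
    (PySem.List.pyRange 0 scale.length 1).map
      (fun k => PySem.List.pyGetD scale (PySem.Int.mod (mode + k) scale.length) 0 - root +
        (if mode + k ≥ (scale.length : Int) then 12 else 0))

-- ===== PRECONDITION & SPEC =====
-- Pre_ excludes exactly the inputs on which A raises ValueError (mode out of range, incl. empty scale).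
def Pre_mode_of_scale (scale : List Int) (mode : Int) : Prop :=
  0 ≤ mode ∧ mode < (scale.length : Int)
instance (scale : List Int) (mode : Int) : Decidable (Pre_mode_of_scale scale mode) := by
  unfold Pre_mode_of_scale; infer_instance

def pvWitness_mode_of_scale : List Int × Int := ([0, 2, 4, 5, 7, 9, 11], 1)

def Spec_mode_of_scale (scale : List Int) (mode : Int) (out : List Int) : Prop := out = mode_of_scale_alt scale mode
instance (scale : List Int) (mode : Int) (out : List Int) : Decidable (Spec_mode_of_scale scale mode out) := by unfold Spec_mode_of_scale; infer_instance

-- ===== CLAIM (what is proved, stated in full; the proofs are below) =====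
def Claim_equal_mode_of_scale : Prop := ∀ (scale : List Int) (mode : Int), Dom_mode_of_scale scale mode → Pre_mode_of_scale scale mode → Spec_mode_of_scale scale mode (mode_of_scale scale mode)

-- ===== LEMMAS AND PROOFS =====

-- telescoping node values of the rotated interval list: T j = scale[j] inside, scale[0]+12 at the wrap
def pvT (scale : List Int) (j : Nat) : Int :=
  if j < scale.length then scale.getD j 0 else scale.getD 0 0 + 12

theorem sum_take_tele (L : List Int) (T : Nat → Int)
    (h : ∀ j, (hj : j < L.length) → L[j] = T (j + 1) - T j) :
    ∀ b, b ≤ L.length → (L.take b).sum = T b - T 0 := by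
  intro b hb
  induction b with
  | zero => simp
  | succ b ih =>
    have hbl : b < L.length := by omega
    rw [List.take_add_one, List.getElem?_eq_getElem hbl]
    simp [ih (by omega), h b hbl]

theorem sum_seg_tele (L : List Int) (T : Nat → Int)
    (h : ∀ j, (hj : j < L.length) → L[j] = T (j + 1) - T j)
    (a b : Nat) (hab : a ≤ b) (hb : b ≤ L.length) :
    ((L.drop a).take (b - a)).sum = T b - T a := by
  have h1 : L.take b = L.take a ++ (L.drop a).take (b - a) := by
    rw [← List.take_add]
    congr 1
    omega
  have h2 := sum_take_tele L T h b hb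
  have h3 := sum_take_tele L T h a (by omega)
  rw [h1, List.sum_append, h3] at h2
  omega

theorem fold_app (L : List Int) (acc : List Int) (x : Int) :
    L.foldl (fun acc i => acc ++ [PySem.List.pyGetD acc (-1) 0 + i]) (acc ++ [x])
      = (acc ++ [x]) ++ (List.range L.length).map (fun k => x + (L.take (k + 1)).sum) := by
  induction L generalizing acc x with
  | nil => simp
  | cons i L ih =>
    simp only [List.foldl_cons, PySem.List.pyGetD_neg_one_append_singleton]
    have h := ih (acc ++ [x]) (x + i)
    rw [h, List.length_cons, List.range_succ_eq_map]
    simp [List.map_map, Function.comp, add_assoc]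

theorem intervals0_eq (scale : List Int) :
    (PySem.List.pyRange 1 scale.length 1).map
      (fun i => PySem.List.pyGetD scale i 0 - PySem.List.pyGetD scale (i - 1) 0)
    = (List.range (scale.length - 1)).map (fun k => scale.getD (k + 1) 0 - scale.getD k 0) := by
  rw [PySem.List.pyRange_one, List.map_map]
  have h : ((scale.length : Int) - 1).toNat = scale.length - 1 := by omega
  rw [h]
  apply List.map_congr_left
  intro k _
  simp only [Function.comp]
  have h1 : (1 : Int) + (k : Int) = ((k + 1 : Nat) : Int) := by push_cast; ring
  have h2 : ((k + 1 : Nat) : Int) - 1 = (k : Int) := by push_cast; ring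
  rw [h1, PySem.List.pyGetD_natCast, h2]
  rw [PySem.List.pyGetD_natCast]

theorem rot_take_sum (L : List Int) (T : Nat → Int) (n m j : Nat)
    (hL : L.length = n) (hget : ∀ i, (hi : i < L.length) → L[i] = T (i + 1) - T i)
    (hm : m ≤ n) (hjn : j ≤ n) :
    ((L.drop m ++ L.take m).take j).sum =
      if j ≤ n - m then T (m + j) - T m else (T n - T m) + (T (j - (n - m)) - T 0) := by
  rw [List.take_append, List.sum_append, List.length_drop, hL]
  by_cases hc : j ≤ n - m
  · rw [if_pos hc, show j - (n - m) = 0 from by omega, List.take_zero, List.sum_nil, add_zero]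
    have h := sum_seg_tele L T hget m (m + j) (by omega) (by omega)
    rwa [show m + j - m = j from by omega] at h
  · rw [if_neg hc]
    have hfirst : (L.drop m).take j = L.drop m :=
      List.take_of_length_le (by rw [List.length_drop, hL]; omega)
    have h1 := sum_seg_tele L T hget m n hm (by omega)
    rw [List.take_of_length_le (by rw [List.length_drop, hL])] at h1
    have hsm : j - (n - m) ≤ m := by omega
    rw [hfirst, h1, List.take_take, min_eq_left hsm]
    have h2 := sum_seg_tele L T hget 0 (j - (n - m)) (by omega) (by omega)
    simp only [List.drop_zero, Nat.sub_zero] at h2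
    rw [h2]

theorem main_eq (scale : List Int) (mode : Int)
    (h0 : 0 ≤ mode) (h1 : mode < (scale.length : Int)) :
    mode_of_scale scale mode = mode_of_scale_alt scale mode := by
  have hguard : ¬ (mode < 0 ∨ mode ≥ (scale.length : Int)) := by omega
  by_cases hz : mode = 0
  · simp only [mode_of_scale, mode_of_scale_alt, if_neg hguard, if_pos hz]
  · obtain ⟨m, rfl⟩ : ∃ m : Nat, mode = (m : Int) := ⟨mode.toNat, (Int.toNat_of_nonneg h0).symm⟩
    have hmn : m < scale.length := by exact_mod_cast h1
    have hm1 : 1 ≤ m := by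
      rcases Nat.eq_zero_or_pos m with h | h
      · exact absurd (by exact_mod_cast congrArg (Nat.cast : Nat → Int) h) hz
      · exact h
    simp only [mode_of_scale, mode_of_scale_alt, if_neg hguard, if_neg hz]
    rw [intervals0_eq]
    set I0 : List Int := (List.range (scale.length - 1)).map
      (fun k => scale.getD (k + 1) 0 - scale.getD k 0) with hI0
    have hI0get : ∀ j, (hj : j < I0.length) → I0[j] = scale.getD (j + 1) 0 - scale.getD j 0 := by
      intro j hj
      simp [hI0]
    have hlen0 : I0.length = scale.length - 1 := by simp [hI0]
    have hsum : I0.sum = scale.getD (scale.length - 1) 0 - scale.getD 0 0 := by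
      have h := sum_take_tele I0 (fun j => scale.getD j 0) hI0get I0.length le_rfl
      rwa [List.take_length, hlen0] at h
    set I1 : List Int := I0 ++ [12 - I0.sum] with hI1
    have hlen1 : I1.length = scale.length := by
      simp [hI1, hlen0]; omega
    have hI1get : ∀ j, (hj : j < I1.length) → I1[j] = pvT scale (j + 1) - pvT scale j := by
      intro j hj
      rw [hlen1] at hj
      by_cases hcase : j < scale.length - 1
      · simp only [hI1]
        rw [List.getElem_append_left (by rw [hlen0]; exact hcase), hI0get j (by omega)]
        unfold pvT
        rw [if_pos (by omega), if_pos (by omega)]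
      · have hj' : j = scale.length - 1 := by omega
        subst hj'
        simp only [hI1]
        rw [List.getElem_append_right (by rw [hlen0])]
        simp only [hlen0, Nat.sub_self, List.getElem_singleton]
        rw [hsum]
        unfold pvT
        rw [if_neg (by omega), if_pos (by omega)]
        ring
    rw [PySem.List.slice_from_natCast, PySem.List.slice_to_natCast, PySem.List.slice_to_neg_one]
    set I2 : List Int := I1.drop m ++ I1.take m with hI2
    have hlen2 : I2.length = scale.length := by
      simp [hI2, hlen1]
      omega
    -- evaluate A's accumulation loop as prefix sums
    rw [show ([0] : List Int) = [] ++ [0] from rfl, fold_app]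
    have hlenDL : I2.dropLast.length = scale.length - 1 := by
      rw [List.length_dropLast, hlen2]
    rw [hlenDL]
    -- evaluate B's comprehension
    rw [PySem.List.pyRange_one, List.map_map]
    rw [show ((scale.length : Int) - 0).toNat = scale.length from by omega]
    rw [show scale.length = (scale.length - 1) + 1 from by omega, List.range_succ_eq_map,
      List.map_cons, List.map_map]
    rw [show (scale.length - 1) + 1 = scale.length from by omega]
    simp only [List.nil_append, List.singleton_append, Function.comp]
    congr 1
    · -- head element: B's k = 0 gives 0
      simp only [Nat.cast_zero, add_zero]
      rw [PySem.Int.mod_eq_emod_of_pos (by omega), Int.emod_eq_of_lt (by omega) (by omega)]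
      simp; omega
    · -- tail elements
      apply List.map_congr_left
      intro k hk
      rw [List.mem_range] at hk
      simp only [Function.comp, Nat.succ_eq_add_one, Nat.cast_add, Nat.cast_one, zero_add]
      -- A side: dropLast.take (k+1) = I2.take (k+1), then the rotated telescoping sum
      rw [List.dropLast_eq_take, hlen2, List.take_take, min_eq_left (by omega)]
      rw [rot_take_sum I1 (pvT scale) scale.length m (k + 1) hlen1 hI1get (by omega) (by omega)]
      -- B side: the index and the wrap test
      rw [show ((m : Int) + ((k : Int) + 1)) = (((m + (k + 1) : Nat)) : Int) from by push_cast; ring]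
      rw [PySem.Int.mod_natCast, PySem.List.pyGetD_natCast, PySem.List.pyGetD_natCast]
      have hmod : (m + (k + 1)) % scale.length =
          if scale.length ≤ m + (k + 1) then m + (k + 1) - scale.length else m + (k + 1) := by
        split_ifs with hw
        · rw [Nat.mod_eq_sub_mod hw]
          exact Nat.mod_eq_of_lt (by omega)
        · exact Nat.mod_eq_of_lt (by omega)
      by_cases hc : k + 1 ≤ scale.length - m
      · rw [if_pos hc]
        by_cases hw : scale.length ≤ m + (k + 1)
        · -- wrap boundary: m + (k+1) = scale.length
          rw [hmod, if_pos hw, if_pos (by exact_mod_cast hw)]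
          unfold pvT
          rw [if_neg (by omega), if_pos (by omega)]
          rw [show m + (k + 1) - scale.length = 0 from by omega]
          ring
        · rw [hmod, if_neg hw, if_neg (by exact_mod_cast hw)]
          unfold pvT
          rw [if_pos (by omega), if_pos (by omega)]
          ring
      · rw [if_neg hc]
        have hw : scale.length ≤ m + (k + 1) := by omega
        rw [hmod, if_pos hw, if_pos (by exact_mod_cast hw)]
        unfold pvT
        rw [if_neg (by omega), if_pos (by omega), if_pos (by omega), if_pos (by omega)]
        rw [show k + 1 - (scale.length - m) = m + (k + 1) - scale.length from by omega]
        ring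

-- ===== VERDICT (by name: the statement is the Claim_ definition above) =====
theorem mode_of_scale_spec : Claim_equal_mode_of_scale := by
  intro scale mode _ hpre
  exact main_eq scale mode hpre.1 hpre.2
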